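-- pv_equiv track=rewrite | github.com/JoaoPSFranca/BCC-Complexidade-de-Algoritimo | Otimizacao/Otimizar.py | encontrar_ordem_ineficiente
-- ===== SOURCE A (Python) =====
-- def encontrar_ordem_ineficiente(a, b, c):
--     numeros = [a, b, c]
--     for i in range(len(numeros)):
--         maior = True
--         for j in range(len(numeros)):
--             if numeros[j] > numeros[i]:
--                 maior = False
--                 break
--         if maior:
--             maior_num = numeros[i]
--     for i in range(len(numeros)):
--         menor = True
--         for j in range(len(numeros)):
--             if numeros[j] < numeros[i]:
--                 menor = False
--                 break
--         if menor:
--             menor_num = numeros[i]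
--
--     meio_num = sum(numeros) - maior_num - menor_num
--     return maior_num, meio_num, menor_num
-- ===== SOURCE B (Python) =====
-- def encontrar_ordem_ineficiente(a, b, c):
--     menor = min(a, b, c)
--     maior = max(a, b, c)
--     return maior, a + b + c - maior - menor, menor
-- ===== Notes on version B (the rewrite author's own statement) =====
-- stated objective: simpler
-- what changed: Replaces the two nested flag-loops (quadratic scan for the unbeaten/unbeatable element) with direct min/max on the three values and sum-minus-extremes for the middle.
import Mathlib
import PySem

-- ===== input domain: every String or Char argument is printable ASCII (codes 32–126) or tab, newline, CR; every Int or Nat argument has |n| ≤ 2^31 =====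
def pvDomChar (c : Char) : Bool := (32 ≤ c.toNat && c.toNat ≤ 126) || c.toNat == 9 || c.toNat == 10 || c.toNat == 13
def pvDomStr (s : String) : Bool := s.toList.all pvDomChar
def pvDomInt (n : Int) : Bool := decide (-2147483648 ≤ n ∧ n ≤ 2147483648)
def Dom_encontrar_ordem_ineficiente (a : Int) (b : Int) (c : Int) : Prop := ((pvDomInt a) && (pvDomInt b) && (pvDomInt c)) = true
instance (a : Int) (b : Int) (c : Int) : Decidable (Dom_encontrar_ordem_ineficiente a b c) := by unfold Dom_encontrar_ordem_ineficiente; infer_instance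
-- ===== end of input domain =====

-- B replaces A's two nested flag-loops by min/max and sum-minus-extremes (simpler, same values).

-- ===== PORT A =====
-- inner 'for j … if numeros[j] > x: maior = False; break' loop: returns true iff some element beats x (break = stop at first)
def pvAnyGT : List Int → Int → Bool
  | [], _ => false
  | y :: ys, x => if y > x then true else pvAnyGT ys x

def pvAnyLT : List Int → Int → Bool
  | [], _ => false
  | y :: ys, x => if y < x then true else pvAnyLT ys x

def encontrar_ordem_ineficiente (a : Int) (b : Int) (c : Int) : Int × Int × Int :=
  let numeros := [a, b, c]
  -- outer loops: last element with the 'maior'/'menor' flag still true is kept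
  let maiorOpt := numeros.foldl (fun acc xi => if pvAnyGT numeros xi then acc else some xi) none
  let menorOpt := numeros.foldl (fun acc xi => if pvAnyLT numeros xi then acc else some xi) none
  match maiorOpt, menorOpt with
  | some maior_num, some menor_num =>
      (maior_num, (a + b + c) - maior_num - menor_num, menor_num)
  | _, _ => (0, 0, 0)  -- unreachable: Python always assigns both (NameError never occurs); totality guard only

-- ===== PORT B =====
def encontrar_ordem_ineficiente_alt (a : Int) (b : Int) (c : Int) : Int × Int × Int :=
  let menor := min a (min b c)
  let maior := max a (max b c)
  (maior, a + b + c - maior - menor, menor)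

-- ===== PRECONDITION & SPEC =====
def Spec_encontrar_ordem_ineficiente (a : Int) (b : Int) (c : Int) (out : Int × Int × Int) : Prop := out = encontrar_ordem_ineficiente_alt a b c
instance (a : Int) (b : Int) (c : Int) (out : Int × Int × Int) : Decidable (Spec_encontrar_ordem_ineficiente a b c out) := by unfold Spec_encontrar_ordem_ineficiente; infer_instance

-- ===== CLAIM (what is proved, stated in full; the proofs are below) =====
def Claim_equal_encontrar_ordem_ineficiente : Prop := ∀ (a : Int) (b : Int) (c : Int), Dom_encontrar_ordem_ineficiente a b c → Spec_encontrar_ordem_ineficiente a b c (encontrar_ordem_ineficiente a b c)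

-- ===== LEMMAS AND PROOFS =====

-- ===== VERDICT (by name: the statement is the Claim_ definition above) =====
set_option maxHeartbeats 2000000 in
theorem encontrar_ordem_ineficiente_spec : Claim_equal_encontrar_ordem_ineficiente := by
  intro a b c _
  show encontrar_ordem_ineficiente a b c = encontrar_ordem_ineficiente_alt a b c
  simp only [encontrar_ordem_ineficiente, encontrar_ordem_ineficiente_alt,
    pvAnyGT, pvAnyLT, List.foldl]
  split_ifs <;> simp_all <;> omega
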